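-- pv_equiv track=rewrite | github.com/LaRenaiocco/job-practice | codewars.py | song_decoder
-- ===== SOURCE A (Python) =====
-- def song_decoder(song):
--     words = song.split("WUB")
--     og_song = ""
--     for word in words:
--         if word != "":
--             og_song += word
--             og_song += " "
--
--     return og_song.strip(" ")
-- ===== SOURCE B (Python) =====
-- def song_decoder(song):
--     # One left-to-right scan: copy characters, emit a single space per
--     # maximal run of "WUB" delimiters, then strip boundary spaces.
--     out = []
--     prev_wub = False
--     i = 0
--     while i < len(song):
--         if song.startswith("WUB", i):
--             if not prev_wub:
--                 out.append(" ")
--             prev_wub = True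
--             i += 3
--         else:
--             out.append(song[i])
--             prev_wub = False
--             i += 1
--     return "".join(out).strip(" ")
-- ===== Notes on version B (the rewrite author's own statement) =====
-- stated objective: alternative
-- what changed: Replaces split-on-WUB / filter / accumulate-and-strip with a single left-to-right character scan that copies characters and emits one space per maximal WUB run, stripping boundary spaces at the end.
import Mathlib
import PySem

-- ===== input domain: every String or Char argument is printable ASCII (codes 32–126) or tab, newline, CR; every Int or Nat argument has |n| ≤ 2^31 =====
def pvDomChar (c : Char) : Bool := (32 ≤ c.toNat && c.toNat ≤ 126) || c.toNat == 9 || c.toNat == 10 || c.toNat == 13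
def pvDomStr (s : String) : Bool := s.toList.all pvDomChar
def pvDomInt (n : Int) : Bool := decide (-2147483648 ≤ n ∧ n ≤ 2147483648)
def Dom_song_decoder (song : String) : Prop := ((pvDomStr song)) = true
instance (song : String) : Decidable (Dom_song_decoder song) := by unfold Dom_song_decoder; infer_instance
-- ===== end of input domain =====

-- B replaces split/filter/join-strip with a single character scan emitting one space per WUB run; return values proved equal.
-- ===== PORT A =====
def song_decoder (song : String) : String :=
  let words := PySem.Chars.splitOn song.toList "WUB".toList
  let og_song := words.foldl (fun og word => if word ≠ [] then og ++ word ++ [' '] else og) ([] : List Char)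
  String.ofList (PySem.Chars.stripChars og_song [' '])

-- ===== PORT B =====
-- the while loop of Source B: out = accumulated list, prevWub = "previous token was WUB"
def songAltGo : List Char → Bool → List Char → List Char
  | 'W'::'U'::'B'::rest, prevWub, out => songAltGo rest true (if prevWub then out else out ++ [' '])
  | c::rest, _, out => songAltGo rest false (out ++ [c])
  | [], _, out => out

def song_decoder_alt (song : String) : String :=
  String.ofList (PySem.Chars.stripChars (songAltGo song.toList false []) [' '])

-- ===== PRECONDITION & SPEC =====
def Spec_song_decoder (song : String) (out : String) : Prop := out = song_decoder_alt song
instance (song : String) (out : String) : Decidable (Spec_song_decoder song out) := by unfold Spec_song_decoder; infer_instance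

-- ===== CLAIM (what is proved, stated in full; the proofs are below) =====
def Claim_equal_song_decoder : Prop := ∀ (song : String), Dom_song_decoder song → Spec_song_decoder song (song_decoder song)

-- ===== LEMMAS AND PROOFS =====

-- recursive model of splitting on "WUB"
def smWUB : List Char → List (List Char)
  | 'W'::'U'::'B'::rest => [] :: smWUB rest
  | c::rest =>
    match smWUB rest with
    | w::ws => (c::w)::ws
    | [] => [[c]]
  | [] => [[]]

lemma smWUB_ne_nil (cs : List Char) : smWUB cs ≠ [] := by
  induction cs using smWUB.induct <;> simp_all [smWUB]

-- spaced join of the nonempty pieces, each followed by one space (A's pre-strip string)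
def smFlat (cs : List Char) : List Char :=
  ((smWUB cs).filter (fun w => w ≠ [])).flatMap (fun w => w ++ [' '])

-- "the last piece of the WUB-split is nonempty"
def endsWord : List Char → Bool
  | 'W'::'U'::'B'::rest => endsWord rest
  | _::[] => true
  | _::rest => endsWord rest
  | [] => false

-- accumulator-free form of the scanner
def bRun : List Char → Bool → List Char
  | 'W'::'U'::'B'::rest, prevWub => (if prevWub then [] else [' ']) ++ bRun rest true
  | c::rest, _ => c :: bRun rest false
  | [], _ => []

lemma smWUB_go_spec (fuel : Nat) :
    ∀ (l cur : List Char) (acc : List (List Char)), l.length ≤ fuel →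
    PySem.Chars.splitOn.go "WUB".toList fuel l cur acc
      = acc.reverse ++ (match smWUB l with
          | w::ws => (cur.reverse ++ w)::ws
          | [] => [cur.reverse]) := by
  induction fuel with
  | zero =>
    intro l cur acc hl
    have hl0 : l = [] := by cases l <;> simp_all
    subst hl0
    rw [PySem.Chars.splitOn.go.eq_def]
    simp [smWUB]
  | succ fuel ih =>
    intro l cur acc hl
    cases l with
    | nil =>
      rw [PySem.Chars.splitOn.go.eq_def]
      simp [smWUB]
    | cons c rest =>
      rw [PySem.Chars.splitOn.go.eq_def]
      dsimp only
      by_cases hp : ("WUB".toList).isPrefixOf (c::rest) = true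
      · rw [List.isPrefixOf_iff_prefix] at hp
        obtain ⟨t, ht⟩ := hp
        have hc : c = 'W' := by simpa using (congrArg (fun l => l.head?) ht).symm
        have hrest : rest = 'U'::'B'::t := by
          simp only [show "WUB".toList = ['W','U','B'] from rfl, List.cons_append, List.nil_append, List.cons.injEq] at ht
          exact ht.2.symm ▸ rfl
        subst hc; subst hrest
        simp only [List.isPrefixOf_iff_prefix]
        rw [if_pos ⟨t, rfl⟩]
        have hlen : t.length ≤ fuel := by simp at hl; omega
        rw [ih _ [] (cur.reverse :: acc) (by simpa using hlen)]
        obtain ⟨w, ws, hws⟩ := List.exists_cons_of_ne_nil (smWUB_ne_nil t)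
        simp [smWUB, hws]
      · rw [if_neg hp]
        have hlen : rest.length ≤ fuel := by simp at hl; omega
        rw [ih rest (c::cur) acc hlen]
        obtain ⟨w, ws, hws⟩ := List.exists_cons_of_ne_nil (smWUB_ne_nil rest)
        have hside : ∀ (r : List Char), c = 'W' → rest = 'U'::'B'::r → False := by
          intro r hc hr
          exact hp (by rw [List.isPrefixOf_iff_prefix]; exact ⟨r, by simp [hc, hr]⟩)
        rw [smWUB.eq_2 _ _ hside, hws]
        simp

lemma splitOn_eq_smWUB (cs : List Char) :
    PySem.Chars.splitOn cs "WUB".toList = smWUB cs := by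
  rw [PySem.Chars.splitOn]
  rw [smWUB_go_spec (cs.length + 1) cs [] [] (by omega)]
  obtain ⟨w, ws, hws⟩ := List.exists_cons_of_ne_nil (smWUB_ne_nil cs)
  simp [hws]

lemma songAltGo_eq (cs : List Char) (prev : Bool) (out : List Char) :
    songAltGo cs prev out = out ++ bRun cs prev := by
  induction cs, prev using bRun.induct generalizing out with
  | case1 rest prev ih =>
    rw [songAltGo, bRun, ih]
    cases prev <;> simp
  | case2 c rest prev h ih =>
    rw [songAltGo.eq_2 _ _ _ _ h, bRun.eq_2 _ _ _ h, ih]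
    simp
  | case3 prev =>
    simp [songAltGo, bRun]

lemma foldl_smFlat (ws : List (List Char)) (a : List Char) :
    ws.foldl (fun og word => if word ≠ [] then og ++ word ++ [' '] else og) a
      = a ++ (ws.filter (fun w => w ≠ [])).flatMap (fun w => w ++ [' ']) := by
  induction ws generalizing a with
  | nil => simp
  | cons w ws ih =>
    rw [List.foldl_cons, ih]
    by_cases hw : w = [] <;> simp [hw]

lemma bRun_bool_eq (cs : List Char) :
    bRun cs false = (if "WUB".toList.isPrefixOf cs then [' '] else []) ++ bRun cs true := by
  by_cases hwub : ∃ r, cs = 'W'::'U'::'B'::r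
  · obtain ⟨r, rfl⟩ := hwub
    rw [bRun.eq_1, bRun.eq_1]
    simp [List.isPrefixOf]
  · cases cs with
    | nil => simp [bRun.eq_3]
    | cons c rest =>
      have hside : ∀ (r : List Char), c = 'W' → rest = 'U'::'B'::r → False := by
        intro r hc hr
        exact hwub ⟨r, by rw [hc, hr]⟩
      have hp : "WUB".toList.isPrefixOf (c::rest) = false := by
        rw [Bool.eq_false_iff]
        intro hpre
        rw [List.isPrefixOf_iff_prefix] at hpre
        obtain ⟨t, ht⟩ := hpre
        exact hwub ⟨t, by simpa using ht.symm⟩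
      rw [bRun.eq_2 _ _ _ hside, bRun.eq_2 _ _ _ hside, hp]
      simp

lemma wubList : "WUB".toList = ['W','U','B'] := rfl

lemma smFlat_eq_bRun (cs : List Char) :
    smFlat cs = bRun cs true ++ (if endsWord cs then [' '] else []) := by
  induction cs using smWUB.induct with
  | case1 rest ih =>
    simpa [smFlat, smWUB.eq_1, bRun.eq_1, endsWord.eq_1] using ih
  | case2 c rest h w ws hws ih =>
    rw [smFlat, smWUB.eq_2 _ _ h, hws, bRun.eq_2 _ _ _ h, bRun_bool_eq rest]
    rw [smFlat, hws] at ih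
    cases rest with
    | nil =>
      have hwws : w = [] ∧ ws = [] := by simpa [smWUB] using hws.symm
      obtain ⟨rfl, rfl⟩ := hwws
      simp [bRun.eq_3, endsWord.eq_2, wubList]
    | cons c2 r2 =>
      rw [endsWord.eq_3 _ _ h (by simp)]
      by_cases hp : "WUB".toList.isPrefixOf (c2::r2) = true
      · have hpre := hp
        rw [List.isPrefixOf_iff_prefix] at hpre
        obtain ⟨t, ht⟩ := hpre
        rw [wubList] at ht
        obtain ⟨rfl, rfl⟩ : c2 = 'W' ∧ r2 = 'U'::'B'::t := by simpa using ht.symm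
        rw [smWUB.eq_1] at hws
        injection hws with h1 h2
        subst h1
        rw [if_pos hp]
        simp only [bRun.eq_1, endsWord.eq_1, if_true] at ih ⊢
        simp only [List.filter_cons] at ih ⊢
        simp only [decide_not] at ih ⊢
        simp at ih
        simp [ih]
      · have hw : w ≠ [] := by
          have hside2 : ∀ (r : List Char), c2 = 'W' → r2 = 'U'::'B'::r → False := by
            intro r hc hr
            apply hp
            rw [List.isPrefixOf_iff_prefix, wubList]
            exact ⟨r, by simp [hc, hr]⟩
          obtain ⟨w2, ws2, hws2⟩ := List.exists_cons_of_ne_nil (smWUB_ne_nil r2)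
          rw [smWUB.eq_2 _ _ hside2, hws2] at hws
          injection hws with h1 h2
          rw [← h1]
          exact List.cons_ne_nil _ _
        rw [if_neg hp]
        dsimp only
        have hcw : (c::w) ≠ [] := List.cons_ne_nil _ _
        simp only [List.filter_cons, List.flatMap_cons, ne_eq, hw, hcw, not_false_iff,
          decide_true, if_true, List.nil_append, List.cons_append, List.append_assoc] at ih ⊢
        rw [ih]
  | case3 c rest h hws ih =>
    exact absurd hws (smWUB_ne_nil rest)
  | case4 => simp [smFlat, smWUB, bRun.eq_3, endsWord.eq_4]

lemma strip_cons_space (s : List Char) :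
    PySem.Chars.stripChars (' '::s) [' '] = PySem.Chars.stripChars s [' '] := by
  simp [PySem.Chars.stripChars, List.dropWhile]

lemma strip_append_space (s : List Char) :
    PySem.Chars.stripChars (s ++ [' ']) [' '] = PySem.Chars.stripChars s [' '] := by
  simp only [PySem.Chars.stripChars]
  rw [List.dropWhile_append]
  by_cases h : (s.dropWhile (fun c => [' '].contains c)).isEmpty
  · rw [if_pos h]
    rw [List.isEmpty_iff] at h
    rw [h]
    simp [List.dropWhile]
  · rw [if_neg h]
    rw [List.reverse_append]
    simp

lemma strip_bRun_false (cs : List Char) :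
    PySem.Chars.stripChars (bRun cs false) [' '] = PySem.Chars.stripChars (bRun cs true) [' '] := by
  rw [bRun_bool_eq]
  by_cases hp : "WUB".toList.isPrefixOf cs = true
  · rw [hp]
    simpa using strip_cons_space (bRun cs true)
  · rw [if_neg hp]
    simp

-- ===== VERDICT (by name: the statement is the Claim_ definition above) =====
theorem song_decoder_spec : Claim_equal_song_decoder := by
  intro song _
  unfold Spec_song_decoder song_decoder song_decoder_alt
  dsimp only
  rw [splitOn_eq_smWUB, foldl_smFlat, songAltGo_eq]
  simp only [List.nil_append]
  rw [show ((smWUB song.toList).filter (fun w => w ≠ [])).flatMap (fun w => w ++ [' ']) = smFlat song.toList from rfl]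
  rw [smFlat_eq_bRun, strip_bRun_false]
  by_cases he : endsWord song.toList = true
  · rw [he]
    simp only [if_true]
    rw [strip_append_space]
  · simp [he]
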